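-- pv_equiv track=rewrite | github.com/MrBrantCode/unitest_baseline | mut_generate/mist_train_cf/cf_88870/solution.py | sum_positive_even
-- ===== SOURCE A (Python) =====
-- def sum_positive_even(arr, start=0):
--     if len(arr) == 1:
--         if arr[0] > 0 and arr[0] % 2 == 0:
--             return [(arr[0], start)]
--         else:
--             return []
--
--     mid = len(arr) // 2
--     left_sum = sum_positive_even(arr[:mid], start)
--     right_sum = sum_positive_even(arr[mid:], start + mid)
--
--     return left_sum + right_sum
-- ===== SOURCE B (Python) =====
-- # Single linear scan instead of A's divide-and-conquer recursion; also returns [] on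
-- # the empty list, where A recurses forever (RecursionError) -- excluded by Pre_.
-- def sum_positive_even(arr, start=0):
--     return [(x, i) for i, x in enumerate(arr, start) if x > 0 and x % 2 == 0]
-- ===== Notes on version B (the rewrite author's own statement) =====
-- stated objective: faster
-- what changed: Replaced the divide-and-conquer recursion that slices the list in halves with a single enumerate-based linear scan.
import Mathlib
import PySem

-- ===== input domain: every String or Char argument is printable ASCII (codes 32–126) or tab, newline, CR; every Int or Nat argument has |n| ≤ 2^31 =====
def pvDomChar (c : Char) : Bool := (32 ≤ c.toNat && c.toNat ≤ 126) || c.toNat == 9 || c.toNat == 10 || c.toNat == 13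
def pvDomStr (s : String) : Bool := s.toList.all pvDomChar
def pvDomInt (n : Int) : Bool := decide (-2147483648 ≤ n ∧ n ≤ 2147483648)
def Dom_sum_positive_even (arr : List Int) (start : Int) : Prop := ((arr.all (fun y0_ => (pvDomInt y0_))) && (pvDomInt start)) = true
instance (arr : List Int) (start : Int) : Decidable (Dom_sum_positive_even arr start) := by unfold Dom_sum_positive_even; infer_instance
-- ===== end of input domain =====

-- B replaces A's divide-and-conquer (halve, recurse, concatenate) by one linear
-- enumerate-based scan; on the empty list A raises RecursionError, B returns [].

-- ===== PORT A =====
-- Fuel makes A's recursion total in Lean; fuel = arr.length bounds the actual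
-- recursion depth, so inside Pre_ (arr ≠ []) the fueled port computes exactly
-- what the Python recursion computes.
def sum_positive_even_aux : Nat → List Int → Int → List (Int × Int)
  | 0, _, _ => []
  | fuel + 1, arr, start =>
    if arr.length = 1 then
      -- arr[0] under the length-1 guard
      let x := arr.headI
      if x > 0 ∧ x % 2 = 0 then [(x, start)] else []
    else
      let mid := arr.length / 2
      sum_positive_even_aux fuel (arr.take mid) start ++
        sum_positive_even_aux fuel (arr.drop mid) (start + (mid : Int))

def sum_positive_even (arr : List Int) (start : Int) : List (Int × Int) :=
  sum_positive_even_aux arr.length arr start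

-- ===== PORT B =====
def sum_positive_even_alt (arr : List Int) (start : Int) : List (Int × Int) :=
  (PySem.List.enumerate arr start).filterMap
    (fun p => if p.2 > 0 ∧ p.2 % 2 = 0 then some (p.2, p.1) else none)

-- ===== PRECONDITION & SPEC =====
-- Pre_ excludes only the empty list, on which the Python A recurses forever
-- (arr[:0] = arr) and raises RecursionError.
def Pre_sum_positive_even (arr : List Int) (start : Int) : Prop := arr ≠ []
instance (arr : List Int) (start : Int) : Decidable (Pre_sum_positive_even arr start) := by
  unfold Pre_sum_positive_even; infer_instance

def pvWitness_sum_positive_even : List Int × Int := ([2, 3, 4, -6, 8], 5)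

def Spec_sum_positive_even (arr : List Int) (start : Int) (out : List (Int × Int)) : Prop :=
  out = sum_positive_even_alt arr start
instance (arr : List Int) (start : Int) (out : List (Int × Int)) :
    Decidable (Spec_sum_positive_even arr start out) := by
  unfold Spec_sum_positive_even; infer_instance

-- ===== CLAIM (what is proved, stated in full; the proofs are below) =====
def Claim_equal_sum_positive_even : Prop :=
  ∀ (arr : List Int) (start : Int), Dom_sum_positive_even arr start →
    Pre_sum_positive_even arr start →
    Spec_sum_positive_even arr start (sum_positive_even arr start)

-- ===== LEMMAS AND PROOFS =====

-- Structural one-at-a-time characterisation of the linear scan.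
def pvScan : List Int → Int → List (Int × Int)
  | [], _ => []
  | x :: xs, s => (if x > 0 ∧ x % 2 = 0 then [(x, s)] else []) ++ pvScan xs (s + 1)

theorem alt_eq_pvScan (arr : List Int) (start : Int) :
    sum_positive_even_alt arr start = pvScan arr start := by
  induction arr generalizing start with
  | nil => simp [sum_positive_even_alt, pvScan, PySem.List.enumerate_nil]
  | cons x xs ih =>
    simp only [sum_positive_even_alt, PySem.List.enumerate_cons, List.filterMap_cons, pvScan]
    split_ifs with h <;> simp [← ih (start + 1), sum_positive_even_alt]

theorem pvScan_append (l1 l2 : List Int) (s : Int) :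
    pvScan (l1 ++ l2) s = pvScan l1 s ++ pvScan l2 (s + l1.length) := by
  induction l1 generalizing s with
  | nil => simp [pvScan]
  | cons x xs ih =>
    simp [pvScan, ih (s + 1)]
    ring_nf

theorem aux_eq_pvScan (fuel : Nat) (arr : List Int) (start : Int)
    (hne : arr ≠ []) (hf : arr.length ≤ fuel) :
    sum_positive_even_aux fuel arr start = pvScan arr start := by
  induction fuel generalizing arr start with
  | zero =>
    exact absurd (Nat.le_zero.mp hf) (by simpa [List.length_eq_zero_iff] using hne)
  | succ fuel ih =>
    rw [sum_positive_even_aux]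
    by_cases h1 : arr.length = 1
    · obtain ⟨x, rfl⟩ := List.length_eq_one_iff.mp h1
      rw [if_pos h1]
      simp only [List.headI, pvScan, List.append_nil]
    · have hlen : 2 ≤ arr.length := by
        have : arr.length ≠ 0 := by simpa [List.length_eq_zero_iff] using hne
        omega
      simp only [h1, if_false]
      have hmid1 : 1 ≤ arr.length / 2 := by omega
      have hmid2 : arr.length / 2 < arr.length := by omega
      have htake : (arr.take (arr.length / 2)).length = arr.length / 2 := by
        simp [List.length_take]; omega
      have hdrop : (arr.drop (arr.length / 2)).length = arr.length - arr.length / 2 := by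
        simp [List.length_drop]
      rw [ih _ _ (by rw [← List.length_pos_iff, htake]; omega) (by omega),
          ih _ _ (by rw [← List.length_pos_iff, hdrop]; omega) (by omega)]
      have := pvScan_append (arr.take (arr.length / 2)) (arr.drop (arr.length / 2)) start
      rw [List.take_append_drop] at this
      rw [this, htake]

-- ===== VERDICT (by name: the statement is the Claim_ definition above) =====
theorem sum_positive_even_spec : Claim_equal_sum_positive_even := by
  intro arr start _ hpre
  unfold Spec_sum_positive_even sum_positive_even
  rw [alt_eq_pvScan, aux_eq_pvScan arr.length arr start hpre le_rfl]
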